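-- pv_equiv track=rewrite | github.com/xvandervort/graphoid | src/glang/cli.py | is_statement_complete
-- ===== SOURCE A (Python) =====
-- def is_statement_complete(statement: str) -> bool:
--     """Check if a statement appears to be complete by counting braces."""
--     brace_count = 0
--     paren_count = 0
--     bracket_count = 0
--     in_string = False
--     escape_next = False
--
--     i = 0
--     while i < len(statement):
--         char = statement[i]
--
--         if escape_next:
--             escape_next = False
--             i += 1
--             continue
--
--         if char == '\\':
--             escape_next = True
--             i += 1
--             continue
--
--         if char == '"' and not escape_next:
--             in_string = not in_string
--             i += 1
--             continue
--
--         if in_string: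
--             i += 1
--             continue
--
--         # Count delimiters outside of strings
--         if char == '{':
--             brace_count += 1
--         elif char == '}':
--             brace_count -= 1
--         elif char == '(':
--             paren_count += 1
--         elif char == ')':
--             paren_count -= 1
--         elif char == '[':
--             bracket_count += 1
--         elif char == ']':
--             bracket_count -= 1
--
--         i += 1
--
--     # Statement is complete if all delimiters are balanced
--     return brace_count == 0 and paren_count == 0 and bracket_count == 0
-- ===== SOURCE B (Python) =====
-- def is_statement_complete(statement: str) -> bool:
--     """Check if a statement appears to be complete by counting braces."""
--     # Stage 1: delete every backslash together with the character it escapes,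
--     # by splitting on backslashes and reassembling the unescaped pieces.
--     segs = statement.split('\\')
--     unesc = segs[0]
--     i = 1
--     while i < len(segs):
--         if segs[i] == '' and i + 1 < len(segs):
--             # escaped backslash: the following segment starts unescaped
--             unesc += segs[i + 1]
--             i += 2
--         else:
--             unesc += segs[i][1:]  # drop the escaped character
--             i += 1
--     # Stage 2: split on quotes and keep only the pieces outside string literals.
--     parts = unesc.split('"')
--     kept = []
--     outside = True
--     for part in parts:
--         if outside:
--             kept.extend(part)
--         outside = not outside
--     # Stage 3: per-type balance check.
--     return (kept.count('{') == kept.count('}')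
--             and kept.count('(') == kept.count(')')
--             and kept.count('[') == kept.count(']'))
-- ===== Notes on version B (the rewrite author's own statement) =====
-- stated objective: faster
-- what changed: A runs one character-by-character state machine with in_string/escape_next flags and three running counters; B has no per-character scan and no flags or counters at all: it split()s on backslashes and reassembles to delete escape pairs, split()s the result on quotes keeping every second piece, and finally compares per-type counts of the surviving text. (constant-factor: the per-character Python loop is replaced by C-level str.split/slicing/count)
import Mathlib
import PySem

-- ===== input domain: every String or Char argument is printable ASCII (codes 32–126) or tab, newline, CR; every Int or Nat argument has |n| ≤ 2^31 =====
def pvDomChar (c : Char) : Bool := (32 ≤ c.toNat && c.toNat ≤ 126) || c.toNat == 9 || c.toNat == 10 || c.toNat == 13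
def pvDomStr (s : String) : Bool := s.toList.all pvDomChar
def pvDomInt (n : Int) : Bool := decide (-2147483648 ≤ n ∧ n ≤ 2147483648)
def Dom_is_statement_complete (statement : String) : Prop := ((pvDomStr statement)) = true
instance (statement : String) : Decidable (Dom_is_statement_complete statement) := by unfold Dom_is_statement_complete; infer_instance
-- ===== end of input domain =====

-- B replaces A's character-by-character state machine (flags + three running counters)
-- by a split-based staged computation: split on backslashes to delete escape pairs,
-- split on quotes keeping every second piece, then three per-type count comparisons.
-- Different decomposition; a timing run measured B faster (constant factor).

-- ===== PORT A =====
-- A's while loop: every branch advances i by 1, so it is a structural recursion over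
-- the character list carrying (brace_count, paren_count, bracket_count, in_string, escape_next).
def iscLoopA : List Char → Int → Int → Int → Bool → Bool → (Int × Int × Int)
  | [], b, p, k, _, _ => (b, p, k)
  | c :: rest, b, p, k, ins, esc =>
    if esc then iscLoopA rest b p k ins false
    else if c = '\\' then iscLoopA rest b p k ins true
    else if c = '"' ∧ ¬esc then iscLoopA rest b p k (!ins) esc
    else if ins then iscLoopA rest b p k ins esc
    else if c = '{' then iscLoopA rest (b + 1) p k ins esc
    else if c = '}' then iscLoopA rest (b - 1) p k ins esc
    else if c = '(' then iscLoopA rest b (p + 1) k ins esc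
    else if c = ')' then iscLoopA rest b (p - 1) k ins esc
    else if c = '[' then iscLoopA rest b p (k + 1) ins esc
    else if c = ']' then iscLoopA rest b p (k - 1) ins esc
    else iscLoopA rest b p k ins esc

def is_statement_complete (statement : String) : Bool :=
  let r := iscLoopA statement.toList 0 0 0 false false
  r.1 = 0 ∧ r.2.1 = 0 ∧ r.2.2 = 0

-- ===== PORT B =====
-- B's while loop over segs[1:]: 'segs[i] == "" and i+1 < len(segs)' is the pattern
-- [] :: t :: rest (consume two segments), otherwise append segs[i][1:] and advance one.
-- segs[i][1:] is the slice s[1:] = PySem.List.slice s (some 1) none.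
def pvUnescTail : List (List Char) → List Char
  | [] => []
  | [] :: t :: rest => t ++ pvUnescTail rest
  | s :: rest => PySem.List.slice s (some 1) none ++ pvUnescTail rest

-- B's 'for part in parts' loop with the toggling 'outside' flag, extending kept.
def pvKeptTail : List (List Char) → Bool → List Char
  | [], _ => []
  | p :: rest, outside =>
    if outside then p ++ pvKeptTail rest (!outside) else pvKeptTail rest (!outside)

-- statement.split('\\') with a one-character separator is List.splitOn '\\';
-- segs[0] always exists (split never returns an empty list): pyGetD under that fact.
def is_statement_complete_alt (statement : String) : Bool :=
  let segs := statement.toList.splitOn '\\'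
  let unesc := PySem.List.pyGetD segs 0 [] ++ pvUnescTail segs.tail
  let parts := unesc.splitOn '"'
  let kept := pvKeptTail parts true
  PySem.List.count kept '{' == PySem.List.count kept '}'
    && PySem.List.count kept '(' == PySem.List.count kept ')'
    && PySem.List.count kept '[' == PySem.List.count kept ']'

-- ===== PRECONDITION & SPEC =====
def Spec_is_statement_complete (statement : String) (out : Bool) : Prop := out = is_statement_complete_alt statement
instance (statement : String) (out : Bool) : Decidable (Spec_is_statement_complete statement out) := by unfold Spec_is_statement_complete; infer_instance

-- ===== CLAIM (what is proved, stated in full; the proofs are below) =====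
def Claim_equal_is_statement_complete : Prop := ∀ (statement : String), Dom_is_statement_complete statement → Spec_is_statement_complete statement (is_statement_complete statement)

-- ===== LEMMAS AND PROOFS =====

-- Proof-side staged filters: escape removal, then string-content removal.
def stripEsc : List Char → List Char
  | [] => []
  | '\\' :: [] => []
  | '\\' :: _ :: r => stripEsc r
  | c :: r => c :: stripEsc r

def stripQ : List Char → Bool → List Char
  | [], _ => []
  | c :: r, ins =>
    if c = '"' then stripQ r (!ins)
    else if ins then stripQ r ins
    else c :: stripQ r ins

-- A's combined one-pass filter: the characters A's loop counts over (outside strings,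
-- unescaped, not quotes), keeping all of them.
def filtA : List Char → Bool → Bool → List Char
  | [], _, _ => []
  | c :: r, ins, esc =>
    if esc then filtA r ins false
    else if c = '\\' then filtA r ins true
    else if c = '"' then filtA r (!ins) esc
    else if ins then filtA r ins esc
    else c :: filtA r ins esc

-- A's counters are the initial counters plus per-type count differences over filtA.
theorem iscLoopA_eq_counts (cs : List Char) : ∀ (ins esc : Bool) (b p k : Int),
    iscLoopA cs b p k ins esc =
      (b + ((filtA cs ins esc).count '{' : Int) - ((filtA cs ins esc).count '}' : Int),
       p + ((filtA cs ins esc).count '(' : Int) - ((filtA cs ins esc).count ')' : Int),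
       k + ((filtA cs ins esc).count '[' : Int) - ((filtA cs ins esc).count ']' : Int)) := by
  induction cs with
  | nil => intro ins esc b p k; simp [iscLoopA, filtA]
  | cons c rest ih =>
    intro ins esc b p k
    simp only [iscLoopA, filtA]
    by_cases hesc : esc = true
    · simp [hesc, ih]
    · simp only [Bool.not_eq_true] at hesc; subst hesc
      by_cases hbs : c = '\\'
      · simp [hbs, ih]
      · by_cases hq : c = '"'
        · simp [hq, ih]
        · by_cases hins : ins = true
          · simp [hbs, hq, hins, ih]
          · simp only [Bool.not_eq_true] at hins; subst hins
            by_cases h1 : c = '{' <;> by_cases h2 : c = '}' <;>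
            by_cases h3 : c = '(' <;> by_cases h4 : c = ')' <;>
            by_cases h5 : c = '[' <;> by_cases h6 : c = ']' <;>
              simp [hbs, hq, h1, h2, h3, h4, h5, h6, ih, Prod.ext_iff] <;> omega

-- Escape removal is what B's backslash-split reassembly computes.
theorem stripEsc_splitOn (cs : List Char) :
    stripEsc cs = ((cs.splitOn '\\').headD []) ++ pvUnescTail (cs.splitOn '\\').tail := by
  induction cs using stripEsc.induct with
  | case1 => simp [stripEsc, List.splitOn, List.splitOnP_nil, pvUnescTail]
  | case2 =>
    simp [stripEsc, List.splitOn, List.splitOnP_cons, List.splitOnP_nil, pvUnescTail,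
      PySem.List.slice_from_one]
  | case3 d r ih =>
    by_cases hd : d = '\\'
    · subst hd
      simp only [stripEsc, List.splitOn, List.splitOnP_cons] at *
      simp only [BEq.rfl, if_true]
      cases h : List.splitOnP (fun x => x == '\\') r with
      | nil => exact absurd h (List.splitOnP_ne_nil _ r)
      | cons h0 t =>
        simp only [h, List.headD, List.tail, pvUnescTail] at *
        exact ih
    · simp only [stripEsc, List.splitOn, List.splitOnP_cons] at *
      have hbeq : (d == '\\') = false := by simp [hd]
      simp only [BEq.rfl, if_true, hbeq, Bool.false_eq_true, if_false]
      cases h : List.splitOnP (fun x => x == '\\') r with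
      | nil => exact absurd h (List.splitOnP_ne_nil _ r)
      | cons h0 t =>
        simp only [h, List.modifyHead, List.headD, List.tail, pvUnescTail,
          PySem.List.slice_from_one] at *
        exact ih
  | case4 c r hne1 hne2 ih =>
    have hc : c ≠ '\\' := by
      intro hc; subst hc
      cases r with
      | nil => exact hne1 rfl rfl
      | cons x xs => exact hne2 x xs rfl rfl
    have hbeq : (c == '\\') = false := by simp [hc]
    simp only [stripEsc, List.splitOn, List.splitOnP_cons, hbeq, Bool.false_eq_true,
      if_false] at *
    cases h : List.splitOnP (fun x => x == '\\') r with
    | nil => exact absurd h (List.splitOnP_ne_nil _ r)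
    | cons h0 t =>
      simp only [h, List.modifyHead, List.headD, List.tail] at *
      simp [ih]

-- String-content removal is what B's quote-split keep-every-second-piece loop computes.
theorem stripQ_splitOn (us : List Char) : ∀ (ins : Bool),
    stripQ us ins = pvKeptTail (us.splitOn '"') (!ins) := by
  induction us with
  | nil => intro ins; cases ins <;> simp [stripQ, List.splitOn, List.splitOnP_nil, pvKeptTail]
  | cons c r ih =>
    intro ins
    by_cases hq : c = '"'
    · subst hq
      simp only [stripQ, if_true, List.splitOn, List.splitOnP_cons, BEq.rfl]
      rw [ih]
      cases ins <;> simp [pvKeptTail, List.splitOn]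
    · have hbeq : (c == '"') = false := by simp [hq]
      simp only [stripQ, hq, if_false, List.splitOn, List.splitOnP_cons, hbeq,
        Bool.false_eq_true]
      cases h : List.splitOnP (fun x => x == '"') r with
      | nil => exact absurd h (List.splitOnP_ne_nil _ r)
      | cons h0 t =>
        have ih' := ih ins
        simp only [List.splitOn, h, List.modifyHead] at ih' ⊢
        cases ins <;> simp [pvKeptTail, ih']

-- A's one-pass filter equals the two staged passes.
theorem filtA_staged (cs : List Char) : ∀ (ins : Bool),
    filtA cs ins false = stripQ (stripEsc cs) ins := by
  induction cs using stripEsc.induct with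
  | case1 => intro ins; simp [filtA, stripEsc, stripQ]
  | case2 => intro ins; simp [filtA, stripEsc, stripQ]
  | case3 d r ih =>
    intro ins
    simp only [filtA, stripEsc]
    simp [ih ins]
  | case4 c r hne1 hne2 ih =>
    intro ins
    have hc : c ≠ '\\' := by
      intro hc; subst hc
      cases r with
      | nil => exact hne1 rfl rfl
      | cons x xs => exact hne2 x xs rfl rfl
    simp only [filtA, stripEsc, hc, if_false]
    by_cases hq : c = '"'
    · simp [hq, stripQ, ih]
    · by_cases hins : ins = true
      · simp [hq, hins, stripQ, ih]
      · simp only [Bool.not_eq_true] at hins; subst hins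
        simp [hq, stripQ, ih]

-- ===== VERDICT (by name: the statement is the Claim_ definition above) =====
theorem is_statement_complete_spec : Claim_equal_is_statement_complete := by
  intro s _
  unfold Spec_is_statement_complete is_statement_complete is_statement_complete_alt
  rw [iscLoopA_eq_counts, filtA_staged, stripEsc_splitOn, stripQ_splitOn]
  have hhead : (s.toList.splitOn '\\').headD [] = PySem.List.pyGetD (s.toList.splitOn '\\') 0 [] := by
    cases h : s.toList.splitOn '\\' with
    | nil => exact absurd h (List.splitOnP_ne_nil _ s.toList)
    | cons h0 t => simp [PySem.List.pyGetD_zero_cons]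
  rw [hhead]
  rw [Bool.eq_iff_iff]
  simp only [PySem.List.count_eq, Bool.not_false, Bool.and_eq_true, beq_iff_eq,
    decide_eq_true_eq]
  omega
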